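-- pv_equiv track=rewrite | github.com/jeffbinder/visions-and-revisions | visions.py | get_rhyme
-- ===== SOURCE A (Python) =====
-- def get_rhyme(pron):
--     if pron == []:
--         return 'p'
--     rhyme = ''
--     for ph in reversed(pron):
--         rhyme = ph.replace('1', '').replace('2', '') + rhyme
--         if ph[-1].isdigit() and int(ph[-1]) > 0:
--             break
--     return rhyme
-- ===== SOURCE B (Python) =====
-- def get_rhyme(pron):
--     if pron == []:
--         return 'p'
--     i = 0
--     for j in range(len(pron) - 1, -1, -1):
--         ph = pron[j]
--         if ph[-1].isdigit() and int(ph[-1]) > 0: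
--             i = j
--             break
--     return ''.join(ph.replace('1', '').replace('2', '') for ph in pron[i:])
-- ===== Notes on version B (the rewrite author's own statement) =====
-- stated objective: faster
-- what changed: Instead of building the rhyme by repeatedly prepending stripped phonemes inside the right-to-left scan (quadratic string concatenation), B first scans from the end only to find the pivot index of the last stressed phoneme (0 if none), then builds the result with one ''.join over the stripped suffix pron[i:].
import Mathlib
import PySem

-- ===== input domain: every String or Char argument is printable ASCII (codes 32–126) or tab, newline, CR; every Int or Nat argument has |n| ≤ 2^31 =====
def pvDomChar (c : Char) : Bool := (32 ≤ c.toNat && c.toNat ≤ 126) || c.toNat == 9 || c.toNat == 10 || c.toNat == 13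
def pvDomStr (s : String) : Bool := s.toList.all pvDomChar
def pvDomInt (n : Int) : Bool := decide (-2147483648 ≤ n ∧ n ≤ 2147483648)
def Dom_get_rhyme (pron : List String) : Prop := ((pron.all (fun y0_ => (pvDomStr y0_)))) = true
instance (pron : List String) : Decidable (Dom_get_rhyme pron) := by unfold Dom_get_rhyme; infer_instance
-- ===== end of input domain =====

-- B finds the pivot index first (scan from the right), then builds the result with one join over the stripped
-- suffix, replacing A's repeated string prepending; a timing run measured B faster (objective: faster).

-- shared primitive ports: ph.replace('1','').replace('2','') and "ph[-1].isdigit() and int(ph[-1]) > 0"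
def pvStrip (ph : String) : List Char :=
  PySem.Chars.replace (PySem.Chars.replace ph.toList ['1'] []) ['2'] []

-- Python evaluates ph[-1]; on ph = '' it raises IndexError (excluded by Pre_); the 'none' branch is arbitrary
def pvStressed (ph : String) : Bool :=
  match PySem.List.pyGet? ph.toList (-1) with
  | some c => PySem.Chars.isdigit c && decide (0 < (PySem.Int.ofChars? [c]).getD 0)
  | none => false

-- ===== PORT A =====
-- the 'for ph in reversed(pron)' loop with break, run on pron.reverse
def pvLoopA : List String → List Char
  | [] => []
  | ph :: rest => if pvStressed ph then pvStrip ph else pvLoopA rest ++ pvStrip ph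

def get_rhyme (pron : List String) : String :=
  if pron = [] then "p" else String.ofList (pvLoopA pron.reverse)

-- ===== PORT B =====
-- 'for j in range(len(pron)-1, -1, -1)' visiting (j, pron[j]) = the reversed enumeration; i = 0 if no break
def pvPivot : List (Int × String) → Int
  | [] => 0
  | (j, ph) :: rest => if pvStressed ph then j else pvPivot rest

def get_rhyme_alt (pron : List String) : String :=
  if pron = [] then "p"
  else String.ofList (PySem.Chars.join []
    ((PySem.List.slice pron (some (pvPivot (PySem.List.enumerate pron).reverse)) none).map pvStrip))

-- ===== PRECONDITION & SPEC =====
-- Pre_ excludes exactly the inputs where Python A raises IndexError: an empty phoneme string that the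
-- right-to-left scan reaches, i.e. an empty phoneme with no stressed phoneme strictly to its right.
-- (B raises at the same point, so there is nothing to match there.)
def Pre_get_rhyme (pron : List String) : Prop :=
  ∀ j < pron.length, pron.getD j "" = "" →
    ∃ k < pron.length, j < k ∧ ∃ c, (pron.getD k "").toList.getLast? = some c ∧ '1' ≤ c ∧ c ≤ '9'
instance (pron : List String) : Decidable (Pre_get_rhyme pron) := by unfold Pre_get_rhyme; infer_instance
def pvWitness_get_rhyme : List String := ["K", "AE1", "T"]

def Spec_get_rhyme (pron : List String) (out : String) : Prop := out = get_rhyme_alt pron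
instance (pron : List String) (out : String) : Decidable (Spec_get_rhyme pron out) := by unfold Spec_get_rhyme; infer_instance

-- ===== CLAIM (what is proved, stated in full; the proofs are below) =====
def Claim_equal_get_rhyme : Prop := ∀ (pron : List String), Dom_get_rhyme pron → Pre_get_rhyme pron → Spec_get_rhyme pron (get_rhyme pron)

-- ===== LEMMAS AND PROOFS =====

theorem pv_join_nil_flatten (l : List (List Char)) : PySem.Chars.join [] l = l.flatten := by
  induction l with
  | nil => rfl
  | cons a t ih =>
    cases t with
    | nil => rw [PySem.Chars.join_singleton]; simp
    | cons b r => rw [PySem.Chars.join_cons_cons, List.flatten_cons, ih]; simp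

theorem pvPivot_bounds (l : List (Int × String)) (n : Int) (h0 : 0 ≤ n)
    (h : ∀ p ∈ l, 0 ≤ p.1 ∧ p.1 ≤ n) : 0 ≤ pvPivot l ∧ pvPivot l ≤ n := by
  induction l with
  | nil => simpa [pvPivot] using h0
  | cons p t ih =>
    obtain ⟨j, ph⟩ := p
    simp only [pvPivot]
    split_ifs
    · exact (h _ (List.mem_cons_self))
    · exact ih (fun q hq => h q (List.mem_cons_of_mem _ hq))

theorem pv_main (pron : List String) :
    pvLoopA pron.reverse =
    PySem.Chars.join []
      ((PySem.List.slice pron (some (pvPivot (PySem.List.enumerate pron).reverse)) none).map pvStrip) := by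
  induction pron using List.reverseRecOn with
  | nil => rfl
  | append_singleton xs x ih =>
    have henum : (PySem.List.enumerate (xs ++ [x])).reverse
        = ((xs.length : Int), x) :: (PySem.List.enumerate xs).reverse := by
      rw [PySem.List.enumerate_append]
      simp [PySem.List.enumerate]
    rw [List.reverse_append, henum]
    simp only [List.reverse_singleton, List.singleton_append, pvLoopA, pvPivot]
    by_cases hstr : pvStressed x
    · simp only [hstr, if_pos]
      rw [PySem.List.slice_from (xs ++ [x]) (by positivity)]
      simp [PySem.Chars.join_singleton]
    · simp only [hstr, if_neg, Bool.false_eq_true, not_false_iff, ih]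
      set i := pvPivot (PySem.List.enumerate xs).reverse with hi
      have hb : 0 ≤ i ∧ i ≤ (xs.length : Int) := by
        apply pvPivot_bounds _ _ (by positivity)
        intro p hp
        rw [List.mem_reverse, PySem.List.mem_enumerate_iff] at hp
        obtain ⟨k, hk, rfl⟩ := hp
        constructor <;> simp; omega
      have htn : i.toNat ≤ xs.length := by omega
      rw [PySem.List.slice_from _ hb.1, PySem.List.slice_from _ hb.1,
          List.drop_append_of_le_length htn]
      rw [List.map_append, List.map_singleton, pv_join_nil_flatten, pv_join_nil_flatten,
          List.flatten_append]
      simp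

-- ===== VERDICT (by name: the statement is the Claim_ definition above) =====
theorem get_rhyme_spec : Claim_equal_get_rhyme := by
  intro pron _ _
  unfold Spec_get_rhyme get_rhyme get_rhyme_alt
  split_ifs
  · rfl
  · rw [pv_main]
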